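-- pv_equiv track=rewrite | github.com/EmonaKiri/YourWaifu | bot.py | replace_vowels
-- ===== SOURCE A (Python) =====
-- def replace_vowels(text):
--     vowels = 'aeiouAEIOU'
--     def replace_first_vowel(word):
--         if len(word) == 1 or word.startswith('@'):  # Leave single-character words and mentions alone
--             return word
--         for i, char in enumerate(word):
--             if char in vowels:
--                 return word[:i] + "'" + word[i+1:]
--         return word  # Return the word unchanged if no vowels are found
--     return ' '.join([replace_first_vowel(word) for word in text.split()])
-- ===== SOURCE B (Python) =====
-- def replace_vowels(text):
--     vowels = set('aeiouAEIOU')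
--     def replace_first_vowel(word):
--         if len(word) == 1 or word.startswith('@'):  # leave single-char words and mentions alone
--             return word
--         out = []
--         done = False
--         for ch in word:
--             if not done and ch in vowels:
--                 out.append("'")
--                 done = True
--             else:
--                 out.append(ch)
--         return ''.join(out)
--     return ' '.join(replace_first_vowel(word) for word in text.split())
-- ===== Notes on version B (the rewrite author's own statement) =====
-- stated objective: alternative
-- what changed: Replaced the enumerate index-scan followed by slice-and-concatenate with a single accumulator pass over the word's characters using a done flag (and a vowel set), so the word is never re-traversed for slicing.
import Mathlib
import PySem

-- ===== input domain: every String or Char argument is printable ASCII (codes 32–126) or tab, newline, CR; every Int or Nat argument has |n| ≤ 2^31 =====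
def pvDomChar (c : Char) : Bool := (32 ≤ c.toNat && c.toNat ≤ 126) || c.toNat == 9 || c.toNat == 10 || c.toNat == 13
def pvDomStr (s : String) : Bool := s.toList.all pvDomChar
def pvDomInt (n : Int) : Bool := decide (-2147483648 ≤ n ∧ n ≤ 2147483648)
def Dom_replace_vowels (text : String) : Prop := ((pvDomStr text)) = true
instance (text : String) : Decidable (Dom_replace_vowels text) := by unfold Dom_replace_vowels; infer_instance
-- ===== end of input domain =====

-- B replaces A's enumerate-scan + slice-and-concatenate with a single accumulator pass using a done flag (alternative decomposition, same cost).

-- ===== PORT A =====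
def pvVowels : List Char := ['a','e','i','o','u','A','E','I','O','U']

-- the 'for i, char in enumerate(word)' loop; an early 'return' ends the loop
def pvScanA : List (Int × Char) → List Char → List Char
  | [], word => word
  | (i, ch) :: rest, word =>
    if PySem.Chars.isIn [ch] pvVowels then  -- 'char in vowels' (1-char substring test)
      PySem.Chars.slice word none (some i) ++ ['\''] ++ PySem.Chars.slice word (some (i + 1)) none
    else pvScanA rest word

def pvReplaceFirstVowelA (word : List Char) : List Char :=
  if PySem.Chars.len word == 1 || PySem.Chars.startswith word ['@'] then word
  else pvScanA (PySem.List.enumerate word 0) word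

def replace_vowels (text : String) : String :=
  PySem.Str.join " " ((PySem.Str.split₀ text).map
    (fun w => String.ofList (pvReplaceFirstVowelA w.toList)))

-- ===== PORT B =====
def pvVowelSet : PySem.Set Char := PySem.Set.ofList ['a','e','i','o','u','A','E','I','O','U']

-- the single pass: out is the accumulated char list, the Bool is the 'done' flag;
-- ''.join(out) over 1-char strings is exactly the char list
def pvFixB (word : List Char) : List Char :=
  if PySem.Chars.len word == 1 || PySem.Chars.startswith word ['@'] then word
  else
    (word.foldl (fun (st : List Char × Bool) ch =>
        if !st.2 && PySem.Set.contains pvVowelSet ch then (st.1 ++ ['\''], true)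
        else (st.1 ++ [ch], st.2)) ([], false)).1

def replace_vowels_alt (text : String) : String :=
  PySem.Str.join " " ((PySem.Str.split₀ text).map
    (fun w => String.ofList (pvFixB w.toList)))

-- ===== PRECONDITION & SPEC =====
def Spec_replace_vowels (text : String) (out : String) : Prop := out = replace_vowels_alt text
instance (text : String) (out : String) : Decidable (Spec_replace_vowels text out) := by unfold Spec_replace_vowels; infer_instance

-- ===== CLAIM (what is proved, stated in full; the proofs are below) =====
def Claim_equal_replace_vowels : Prop := ∀ (text : String), Dom_replace_vowels text → Spec_replace_vowels text (replace_vowels text)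

-- ===== LEMMAS AND PROOFS =====

-- reference function: replace the first vowel
def pvRep : List Char → List Char
  | [] => []
  | c :: cs => if pvVowels.contains c then '\'' :: cs else c :: pvRep cs

lemma pvRep_cons_pos (c : Char) (cs : List Char) (hm : c ∈ pvVowels) :
    pvRep (c :: cs) = '\'' :: cs := by simp [pvRep, hm]

lemma pvRep_cons_neg (c : Char) (cs : List Char) (hm : c ∉ pvVowels) :
    pvRep (c :: cs) = c :: pvRep cs := by simp [pvRep, hm]

lemma pvMemSet (c : Char) : c ∈ pvVowelSet ↔ c ∈ pvVowels := by
  rw [pvVowelSet, PySem.Set.mem_ofList]; rfl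

lemma pvIsIn_singleton (c : Char) : PySem.Chars.isIn [c] pvVowels = pvVowels.contains c := by
  by_cases h : c ∈ pvVowels
  · have h1 : PySem.Chars.isIn [c] pvVowels = true := by
      rw [PySem.Chars.isIn_iff_infix]
      obtain ⟨s, t, heq⟩ := List.append_of_mem h
      exact ⟨s, t, by simp [heq]⟩
    simp [h1, h]
  · have h1 : PySem.Chars.isIn [c] pvVowels = false := by
      rw [PySem.Chars.isIn_eq_false_iff]
      intro hinf
      exact h (hinf.subset (List.mem_singleton_self c))
    simp [h1, h]

lemma pvScanA_spec (cs pre : List Char) :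
    pvScanA (PySem.List.enumerate cs (pre.length : Int)) (pre ++ cs) = pre ++ pvRep cs := by
  induction cs generalizing pre with
  | nil => simp [PySem.List.enumerate_nil, pvScanA, pvRep]
  | cons c cs ih =>
    rw [PySem.List.enumerate_cons]
    simp only [pvScanA, pvIsIn_singleton]
    by_cases hm : c ∈ pvVowels
    · have h : pvVowels.contains c = true := by simpa using hm
      simp only [h, if_true]
      have h1 : PySem.Chars.slice (pre ++ c :: cs) none (some (pre.length : Int)) = pre := by
        simp [PySem.Chars.slice_eq_listSlice, PySem.List.slice_to_natCast]
      have h2 : PySem.Chars.slice (pre ++ c :: cs) (some ((pre.length : Int) + 1)) none = cs := by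
        have hcast : ((pre.length : Int) + 1) = ((pre.length + 1 : Nat) : Int) := by push_cast; ring
        rw [PySem.Chars.slice_eq_listSlice, hcast, PySem.List.slice_from_natCast,
          List.drop_append]
        simp
      rw [h1, h2, pvRep_cons_pos c cs hm]
      simp
    · have h : pvVowels.contains c = false := by simpa using hm
      simp only [h, Bool.false_eq_true, if_false]
      have hcast : (pre.length : Int) + 1 = (((pre ++ [c]).length : Nat) : Int) := by
        simp
      rw [hcast, show pre ++ c :: cs = (pre ++ [c]) ++ cs by simp, ih (pre ++ [c]),
        pvRep_cons_neg c cs hm]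
      simp

def pvStep : (List Char × Bool) → Char → (List Char × Bool) :=
  fun st ch =>
    if !st.2 && PySem.Set.contains pvVowelSet ch then (st.1 ++ ['\''], true)
    else (st.1 ++ [ch], st.2)

lemma pvFold_done (cs : List Char) (acc : List Char) :
    cs.foldl pvStep (acc, true) = (acc ++ cs, true) := by
  induction cs generalizing acc with
  | nil => simp
  | cons c cs ih => simp [pvStep, ih]

lemma pvFold_spec (cs : List Char) (acc : List Char) :
    (cs.foldl pvStep (acc, false)).1 = acc ++ pvRep cs := by
  induction cs generalizing acc with
  | nil => simp [pvRep]
  | cons c cs ih =>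
    by_cases hm : c ∈ pvVowels
    · have hstep : pvStep (acc, false) c = (acc ++ ['\''], true) := by
        simp [pvStep, pvMemSet, hm]
      rw [List.foldl_cons, hstep, pvFold_done, pvRep_cons_pos c cs hm]
      simp
    · have hstep : pvStep (acc, false) c = (acc ++ [c], false) := by
        simp [pvStep, pvMemSet, hm]
      rw [List.foldl_cons, hstep, ih, pvRep_cons_neg c cs hm]
      simp

lemma pvWordEq (w : List Char) : pvReplaceFirstVowelA w = pvFixB w := by
  unfold pvReplaceFirstVowelA pvFixB
  split_ifs with h
  · rfl
  · have hA := pvScanA_spec w []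
    simp only [List.nil_append, List.length_nil, Nat.cast_zero] at hA
    have hB := pvFold_spec w []
    simp only [List.nil_append] at hB
    rw [hA, show (fun (st : List Char × Bool) ch =>
        if !st.2 && PySem.Set.contains pvVowelSet ch then (st.1 ++ ['\''], true)
        else (st.1 ++ [ch], st.2)) = pvStep from rfl, hB]

-- ===== VERDICT (by name: the statement is the Claim_ definition above) =====
theorem replace_vowels_spec : Claim_equal_replace_vowels := by
  intro text _
  unfold Spec_replace_vowels replace_vowels replace_vowels_alt
  congr 1
  exact List.map_congr_left (fun w _ => by rw [pvWordEq])
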